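-- pv_equiv track=rewrite | github.com/CH-JASWANTH-KUMAR/AI-VISIBILITY-SCORE | backend/core/gap_analyzer.py | _group_similar_queries
-- ===== SOURCE A (Python) =====
-- from typing import List, Dict, Any
--
-- def _group_similar_queries(results: List[Dict]) -> Dict[str, List[Dict]]:
--     """Group queries by category/intent"""
--     groups = {
--         'Price/Budget': [],
--         'Quality/Premium': [],
--         'Delivery/Speed': [],
--         'Features/Options': [],
--         'Reviews/Trust': [],
--         'Sustainability': [],
--         'Convenience': [],
--         'General': []
--     }
--
--     keywords = {
--         'Price/Budget': ['cheap', 'affordable', 'budget', 'cost', 'price', 'inexpensive'],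
--         'Quality/Premium': ['best', 'quality', 'premium', 'luxury', 'top', 'high-end'],
--         'Delivery/Speed': ['fast', 'delivery', 'shipping', 'quick', 'express'],
--         'Features/Options': ['feature', 'option', 'variety', 'selection', 'choice'],
--         'Reviews/Trust': ['review', 'rating', 'trusted', 'reliable', 'popular'],
--         'Sustainability': ['eco', 'organic', 'sustainable', 'green', 'natural'],
--         'Convenience': ['easy', 'convenient', 'simple', 'hassle-free']
--     }
--
--     for result in results:
--         query_lower = result.get('query', '').lower()
--         categorized = False
--
--         for category, kw_list in keywords.items():
--             if any(kw in query_lower for kw in kw_list):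
--                 groups[category].append(result)
--                 categorized = True
--                 break
--
--         if not categorized:
--             groups['General'].append(result)
--
--     # Remove empty groups
--     return {k: v for k, v in groups.items() if v}
-- ===== SOURCE B (Python) =====
-- CATEGORIES = [
--     ('Price/Budget', ['cheap', 'affordable', 'budget', 'cost', 'price', 'inexpensive']),
--     ('Quality/Premium', ['best', 'quality', 'premium', 'luxury', 'top', 'high-end']),
--     ('Delivery/Speed', ['fast', 'delivery', 'shipping', 'quick', 'express']),
--     ('Features/Options', ['feature', 'option', 'variety', 'selection', 'choice']),
--     ('Reviews/Trust', ['review', 'rating', 'trusted', 'reliable', 'popular']),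
--     ('Sustainability', ['eco', 'organic', 'sustainable', 'green', 'natural']),
--     ('Convenience', ['easy', 'convenient', 'simple', 'hassle-free']),
-- ]
--
-- def _label(result):
--     q = result.get('query', '').lower()
--     for category, kws in CATEGORIES:
--         if any(kw in q for kw in kws):
--             return category
--     return 'General'
--
-- def _group_similar_queries(results):
--     labeled = [(_label(r), r) for r in results]
--     out = {}
--     for category in [c for c, _ in CATEGORIES] + ['General']:
--         bucket = [r for lab, r in labeled if lab == category]
--         if bucket:
--             out[category] = bucket
--     return out
-- ===== Notes on version B (the rewrite author's own statement) =====
-- stated objective: alternative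
-- what changed: A routes each result into a pre-built dict of eight empty buckets inside one loop and strips empty buckets at the end; B first labels every result with its category in one pass, then builds the output per fixed category by collecting matching labeled results, skipping empty groups.
import Mathlib
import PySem

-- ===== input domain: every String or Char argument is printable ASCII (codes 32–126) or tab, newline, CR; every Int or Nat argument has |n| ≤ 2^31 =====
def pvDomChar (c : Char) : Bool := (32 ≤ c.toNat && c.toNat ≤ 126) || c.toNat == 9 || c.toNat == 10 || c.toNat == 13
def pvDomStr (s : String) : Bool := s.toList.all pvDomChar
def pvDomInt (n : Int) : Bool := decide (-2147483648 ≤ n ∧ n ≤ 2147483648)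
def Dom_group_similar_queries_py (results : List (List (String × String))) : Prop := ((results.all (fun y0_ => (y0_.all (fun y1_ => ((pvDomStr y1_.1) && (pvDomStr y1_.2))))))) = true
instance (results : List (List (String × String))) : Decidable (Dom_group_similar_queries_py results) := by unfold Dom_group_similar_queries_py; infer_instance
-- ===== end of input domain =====

-- B labels each result in one pass, then collects each fixed category's bucket in a second phase (different decomposition, same cost).

-- ===== PORT A =====
def pvKeywords : List (String × List String) :=
  [("Price/Budget", ["cheap", "affordable", "budget", "cost", "price", "inexpensive"]),
   ("Quality/Premium", ["best", "quality", "premium", "luxury", "top", "high-end"]),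
   ("Delivery/Speed", ["fast", "delivery", "shipping", "quick", "express"]),
   ("Features/Options", ["feature", "option", "variety", "selection", "choice"]),
   ("Reviews/Trust", ["review", "rating", "trusted", "reliable", "popular"]),
   ("Sustainability", ["eco", "organic", "sustainable", "green", "natural"]),
   ("Convenience", ["easy", "convenient", "simple", "hassle-free"])]

-- A's inner 'for category, kw_list in keywords.items(): … break' loop:
-- returns the updated groups dict and the 'categorized' flag.
def pvAInner (q : String) (r : List (String × String))
    (kws : List (String × List String))
    (groups : PySem.Dict String (List (List (String × String)))) :
    PySem.Dict String (List (List (String × String))) × Bool :=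
  match kws with
  | [] => (groups, false)
  | (category, kwList) :: rest =>
    if kwList.any (fun kw => PySem.Str.isIn kw q) then
      (groups.modify category [] (fun v => v ++ [r]), true)
    else pvAInner q r rest groups

def group_similar_queries_py (results : List (List (String × String))) : List (String × List (List (String × String))) :=
  let groups0 : PySem.Dict String (List (List (String × String))) :=
    PySem.Dict.mk
      [("Price/Budget", []), ("Quality/Premium", []), ("Delivery/Speed", []),
       ("Features/Options", []), ("Reviews/Trust", []), ("Sustainability", []),
       ("Convenience", []), ("General", [])]
  let groups := results.foldl (fun g r =>
    let queryLower := PySem.Str.lower (PySem.Dict.getD (PySem.Dict.mk r) "query" "")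
    let p := pvAInner queryLower r pvKeywords g
    if p.2 then p.1 else p.1.modify "General" [] (fun v => v ++ [r])) groups0
  -- {k: v for k, v in groups.items() if v}
  (groups.items.foldl
    (fun d p => if p.2.isEmpty then d else d.insert p.1 p.2)
    (PySem.Dict.empty : PySem.Dict String (List (List (String × String))))).items

-- ===== PORT B =====
-- _label: first matching category of CATEGORIES, else 'General'
def pvFirstCat (q : String) : List (String × List String) → String
  | [] => "General"
  | (category, kws) :: rest =>
    if kws.any (fun kw => PySem.Str.isIn kw q) then category else pvFirstCat q rest

def pvLabel (r : List (String × String)) : String :=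
  pvFirstCat (PySem.Str.lower (PySem.Dict.getD (PySem.Dict.mk r) "query" "")) pvKeywords

def group_similar_queries_py_alt (results : List (List (String × String))) : List (String × List (List (String × String))) :=
  let labeled := results.map (fun r => (pvLabel r, r))
  ((pvKeywords.map Prod.fst ++ ["General"]).foldl (fun out category =>
      let bucket := (labeled.filter (fun p => p.1 == category)).map Prod.snd
      if bucket.isEmpty then out else out.insert category bucket)
    (PySem.Dict.empty : PySem.Dict String (List (List (String × String))))).items

-- ===== PRECONDITION & SPEC =====
def Spec_group_similar_queries_py (results : List (List (String × String))) (out : List (String × List (List (String × String)))) : Prop := out = group_similar_queries_py_alt results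
instance (results : List (List (String × String))) (out : List (String × List (List (String × String)))) : Decidable (Spec_group_similar_queries_py results out) := by unfold Spec_group_similar_queries_py; infer_instance

-- ===== CLAIM (what is proved, stated in full; the proofs are below) =====
def Claim_equal_group_similar_queries_py : Prop := ∀ (results : List (List (String × String))), Dom_group_similar_queries_py results → Spec_group_similar_queries_py results (group_similar_queries_py results)

-- ===== LEMMAS AND PROOFS =====

-- A's inner loop together with the 'if not categorized' fallback is a single modify
-- at the first matching category (B's label).
theorem pvAInner_spec (q : String) (r : List (String × String))
    (kws : List (String × List String))
    (groups : PySem.Dict String (List (List (String × String)))) :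
    (if (pvAInner q r kws groups).2 then (pvAInner q r kws groups).1
     else (pvAInner q r kws groups).1.modify "General" [] (fun v => v ++ [r]))
      = groups.modify (pvFirstCat q kws) [] (fun v => v ++ [r]) := by
  induction kws generalizing groups with
  | nil => simp [pvAInner, pvFirstCat]
  | cons hd tl ih =>
    obtain ⟨c, kl⟩ := hd
    simp only [pvAInner, pvFirstCat]
    cases hB : kl.any (fun kw => PySem.Str.isIn kw q) with
    | true => simp
    | false =>
      simp only [Bool.false_eq_true, if_false]
      exact ih groups

-- every label lies among the eight fixed categories
theorem pvLabel_mem (r : List (String × String)) :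
    pvLabel r ∈ pvKeywords.map Prod.fst ++ ["General"] := by
  unfold pvLabel
  generalize PySem.Str.lower (PySem.Dict.getD (PySem.Dict.mk r) "query" "") = q
  simp only [pvKeywords, pvFirstCat]
  split_ifs <;> simp

theorem pvSet_update_of_mem (s : PySem.Set String) (l : List String)
    (h : ∀ x ∈ l, x ∈ s) : PySem.Set.update s l = s := by
  induction l generalizing s with
  | nil => rfl
  | cons x xs ih =>
      have hx : PySem.Set.add s x = s := by
        have : x ∈ s := h x (List.mem_cons_self)
        simp [PySem.Set.add, PySem.Set.contains, this]
      show PySem.Set.update (PySem.Set.add s x) xs = s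
      rw [hx]
      exact ih s (fun y hy => h y (List.mem_cons_of_mem _ hy))

-- A's grouping loop, rewritten to the labelled form
theorem pvGroups_eq (results : List (List (String × String)))
    (g0 : PySem.Dict String (List (List (String × String)))) :
    results.foldl (fun g r =>
      let queryLower := PySem.Str.lower (PySem.Dict.getD (PySem.Dict.mk r) "query" "")
      let p := pvAInner queryLower r pvKeywords g
      if p.2 then p.1 else p.1.modify "General" [] (fun v => v ++ [r])) g0
    = (results.map (fun r => (pvLabel r, r))).foldl
        (fun d p => d.modify p.1 [] (fun v => v ++ [p.2])) g0 := by
  rw [List.foldl_map]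
  apply PySem.List.foldl_congr_mem
  intro g r _
  exact pvAInner_spec _ r pvKeywords g

-- ===== VERDICT (by name: the statement is the Claim_ definition above) =====
theorem group_similar_queries_py_spec : Claim_equal_group_similar_queries_py := by
  intro results _
  unfold Spec_group_similar_queries_py
  unfold group_similar_queries_py group_similar_queries_py_alt
  simp only [pvGroups_eq]
  set labeled := results.map (fun r => (pvLabel r, r)) with hlab
  set g0 : PySem.Dict String (List (List (String × String))) :=
    PySem.Dict.mk
      [("Price/Budget", []), ("Quality/Premium", []), ("Delivery/Speed", []),
       ("Features/Options", []), ("Reviews/Trust", []), ("Sustainability", []),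
       ("Convenience", []), ("General", [])] with hg0
  set groups := labeled.foldl (fun d p => d.modify p.1 [] (fun v => v ++ [p.2])) g0 with hgr
  have hkeys : groups.keys = g0.keys := by
    rw [hgr, PySem.Dict.keys_foldl_modify_key labeled Prod.fst [] (fun _ p v => v ++ [p.2]) g0]
    apply pvSet_update_of_mem
    intro x hx
    simp only [hlab, List.map_map, List.mem_map] at hx
    obtain ⟨r, _, hr⟩ := hx
    have := pvLabel_mem r
    simpa [hg0, PySem.Dict.keys, pvKeywords, ← hr] using this
  have hitems : groups.items =
      (pvKeywords.map Prod.fst ++ ["General"]).map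
        (fun c => (c, (labeled.filter (fun p => p.1 == c)).map Prod.snd)) := by
    have hnd : groups.keys.Nodup := by rw [hkeys]; decide
    rw [PySem.Dict.items_eq_map_keys groups hnd [], hkeys]
    have hk : g0.keys = pvKeywords.map Prod.fst ++ ["General"] := by decide
    rw [hk]
    apply List.map_congr_left
    intro c hc
    rw [hgr, PySem.Dict.getD_foldl_modify_append labeled g0 c]
    have h0 : g0.getD c [] = [] := by fin_cases hc <;> rfl
    rw [h0, List.nil_append]
  rw [hitems, List.foldl_map]
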